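-- pv_equiv track=rewrite | github.com/wj210/NLI_ETP | preprocess/preprocess_eraser.py | get_max_sentences
-- ===== SOURCE A (Python) =====
-- def get_max_sentences(tokenized_text,max_length,take_pos= 'start',start_pos =0):
--     curr_len = 0
--     if take_pos == 'start':
--         for i,sent in enumerate(tokenized_text):
--             curr_len += len(sent)
--             if curr_len > max_length:
--                 return (0,i)
--     elif take_pos == 'end':
--         for i,sen in enumerate(reversed(tokenized_text)):
--             curr_len += len(sen)
--             if curr_len > max_length:
--                 return (len(tokenized_text)-i+1,len(tokenized_text))
--     elif take_pos == 'middle':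
--         for i,sen in enumerate(tokenized_text[start_pos:]):
--             curr_len += len(sen)
--             if curr_len > max_length:
--                 return (start_pos,start_pos+i)
--         return (start_pos,start_pos+i)
--
--     else:
--         raise ValueError(f'Invalid take_pos {take_pos}')
-- ===== SOURCE B (Python) =====
-- def _prefix_sums(sents):
--     sums = []
--     total = 0
--     for s in sents:
--         total += len(s)
--         sums.append(total)
--     return sums
--
--
-- def _first_over(sums, m):
--     for i, t in enumerate(sums):
--         if t > m:
--             return i
--     return None
--
--
-- def get_max_sentences(tokenized_text, max_length, take_pos='start', start_pos=0):
--     if take_pos == 'start':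
--         k = _first_over(_prefix_sums(tokenized_text), max_length)
--         return None if k is None else (0, k)
--     if take_pos == 'end':
--         n = len(tokenized_text)
--         k = _first_over(_prefix_sums(tokenized_text[::-1]), max_length)
--         return None if k is None else (n - k + 1, n)
--     if take_pos == 'middle':
--         tail = tokenized_text[start_pos:]
--         k = _first_over(_prefix_sums(tail), max_length)
--         if k is None:
--             k = len(tail) - 1
--         return (start_pos, start_pos + k)
--     raise ValueError(f'Invalid take_pos {take_pos}')
-- ===== Notes on version B (the rewrite author's own statement) =====
-- stated objective: alternative
-- what changed: B separates the work into two reusable passes -- build the cumulative-sum list of sentence lengths once, then search it for the first entry exceeding max_length -- instead of A's three inline enumerate loops each carrying a running accumulator and branch-specific returns.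
import Mathlib
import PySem

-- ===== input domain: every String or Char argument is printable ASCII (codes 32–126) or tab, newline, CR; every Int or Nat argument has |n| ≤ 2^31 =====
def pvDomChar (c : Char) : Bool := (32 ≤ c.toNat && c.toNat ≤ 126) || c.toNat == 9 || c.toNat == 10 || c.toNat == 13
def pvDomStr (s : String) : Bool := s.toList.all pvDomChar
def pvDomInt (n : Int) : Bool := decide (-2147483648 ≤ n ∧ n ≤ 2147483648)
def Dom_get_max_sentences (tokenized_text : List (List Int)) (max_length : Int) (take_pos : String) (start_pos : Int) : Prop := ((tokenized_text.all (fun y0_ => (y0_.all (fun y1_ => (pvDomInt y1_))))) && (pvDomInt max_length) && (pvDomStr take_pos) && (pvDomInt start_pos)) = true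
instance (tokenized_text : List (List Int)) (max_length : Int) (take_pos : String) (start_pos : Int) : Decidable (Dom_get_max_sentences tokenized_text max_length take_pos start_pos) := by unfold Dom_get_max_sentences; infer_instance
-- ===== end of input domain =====

-- B builds the prefix-sum list of sentence lengths once and searches it, instead of A's three inline accumulator loops; equal return values on Pre_ (A mutates nothing).


-- ===== PORT A =====
-- 'start' branch: enumerate loop with running curr_len
def pvA_loopStart (max_length : Int) : List (List Int) → Int → Int → Option (Int × Int)
  | [], _, _ => none
  | sent :: rest, curr, i =>
      let curr' := curr + (sent.length : Int)
      if curr' > max_length then some (0, i) else pvA_loopStart max_length rest curr' (i + 1)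

-- 'end' branch: same loop over reversed(tokenized_text), n = len(tokenized_text)
def pvA_loopEnd (max_length : Int) (n : Int) : List (List Int) → Int → Int → Option (Int × Int)
  | [], _, _ => none
  | sen :: rest, curr, i =>
      let curr' := curr + (sen.length : Int)
      if curr' > max_length then some (n - i + 1, n) else pvA_loopEnd max_length n rest curr' (i + 1)

-- 'middle' branch: on exhaustion Python falls through to `return (start_pos, start_pos+i)` with the
-- leftover loop variable, which equals counter - 1 here (Pre_ excludes the empty slice, where Python
-- has no loop variable and raises UnboundLocalError)
def pvA_loopMiddle (max_length : Int) (start_pos : Int) : List (List Int) → Int → Int → Option (Int × Int)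
  | [], _, i => some (start_pos, start_pos + i - 1)
  | sen :: rest, curr, i =>
      let curr' := curr + (sen.length : Int)
      if curr' > max_length then some (start_pos, start_pos + i) else pvA_loopMiddle max_length start_pos rest curr' (i + 1)

def get_max_sentences (tokenized_text : List (List Int)) (max_length : Int) (take_pos : String) (start_pos : Int) : Option (Int × Int) :=
  if take_pos = "start" then pvA_loopStart max_length tokenized_text 0 0
  else if take_pos = "end" then pvA_loopEnd max_length (tokenized_text.length : Int) tokenized_text.reverse 0 0
  else if take_pos = "middle" then pvA_loopMiddle max_length start_pos (PySem.List.slice tokenized_text (some start_pos) none) 0 0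
  else none  -- raise ValueError; excluded by Pre_

-- ===== PORT B =====
-- _prefix_sums: cumulative sums of sentence lengths, with running total accumulator
def pvB_prefixSums : List (List Int) → Int → List Int
  | [], _ => []
  | s :: rest, total => (total + (s.length : Int)) :: pvB_prefixSums rest (total + (s.length : Int))

-- _first_over: index of the first entry > m (enumerate loop)
def pvB_firstOver : List Int → Int → Int → Option Int
  | [], _, _ => none
  | t :: rest, m, i => if t > m then some i else pvB_firstOver rest m (i + 1)

def get_max_sentences_alt (tokenized_text : List (List Int)) (max_length : Int) (take_pos : String) (start_pos : Int) : Option (Int × Int) :=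
  if take_pos = "start" then
    match pvB_firstOver (pvB_prefixSums tokenized_text 0) max_length 0 with
    | none => none
    | some k => some (0, k)
  else if take_pos = "end" then
    let n : Int := tokenized_text.length
    match pvB_firstOver (pvB_prefixSums tokenized_text.reverse 0) max_length 0 with
    | none => none
    | some k => some (n - k + 1, n)
  else if take_pos = "middle" then
    let tail := PySem.List.slice tokenized_text (some start_pos) none
    let k := (pvB_firstOver (pvB_prefixSums tail 0) max_length 0).getD ((tail.length : Int) - 1)
    some (start_pos, start_pos + k)
  else none  -- raise ValueError; excluded by Pre_

-- ===== PRECONDITION & SPEC =====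
-- Pre_ excludes exactly where Python A raises: an unknown take_pos (ValueError) and
-- take_pos='middle' with an empty slice (UnboundLocalError).
def Pre_get_max_sentences (tokenized_text : List (List Int)) (max_length : Int) (take_pos : String) (start_pos : Int) : Prop :=
  take_pos = "start" ∨ take_pos = "end" ∨
  (take_pos = "middle" ∧ PySem.List.slice tokenized_text (some start_pos) none ≠ [])
instance (tokenized_text : List (List Int)) (max_length : Int) (take_pos : String) (start_pos : Int) : Decidable (Pre_get_max_sentences tokenized_text max_length take_pos start_pos) := by unfold Pre_get_max_sentences; infer_instance

def pvWitness_get_max_sentences : List (List Int) × Int × String × Int := ([[1, 2], [3]], 2, "start", 0)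

def Spec_get_max_sentences (tokenized_text : List (List Int)) (max_length : Int) (take_pos : String) (start_pos : Int) (out : Option (Int × Int)) : Prop := out = get_max_sentences_alt tokenized_text max_length take_pos start_pos
instance (tokenized_text : List (List Int)) (max_length : Int) (take_pos : String) (start_pos : Int) (out : Option (Int × Int)) : Decidable (Spec_get_max_sentences tokenized_text max_length take_pos start_pos out) := by unfold Spec_get_max_sentences; infer_instance

-- ===== CLAIM (what is proved, stated in full; the proofs are below) =====
def Claim_equal_get_max_sentences : Prop := ∀ (tokenized_text : List (List Int)) (max_length : Int) (take_pos : String) (start_pos : Int), Dom_get_max_sentences tokenized_text max_length take_pos start_pos → Pre_get_max_sentences tokenized_text max_length take_pos start_pos → Spec_get_max_sentences tokenized_text max_length take_pos start_pos (get_max_sentences tokenized_text max_length take_pos start_pos)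
-- ===== LEMMAS AND PROOFS =====
lemma pvStart_eq (ml : Int) : ∀ (xs : List (List Int)) (curr i : Int),
    pvA_loopStart ml xs curr i =
      (match pvB_firstOver (pvB_prefixSums xs curr) ml i with
       | none => none
       | some k => some ((0 : Int), k)) := by
  intro xs
  induction xs with
  | nil => intro curr i; simp [pvA_loopStart, pvB_prefixSums, pvB_firstOver]
  | cons s rest ih =>
      intro curr i
      simp only [pvA_loopStart, pvB_prefixSums, pvB_firstOver]
      split_ifs with h
      · simp
      · exact ih _ _

lemma pvEnd_eq (ml n : Int) : ∀ (xs : List (List Int)) (curr i : Int),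
    pvA_loopEnd ml n xs curr i =
      (match pvB_firstOver (pvB_prefixSums xs curr) ml i with
       | none => none
       | some k => some (n - k + 1, n)) := by
  intro xs
  induction xs with
  | nil => intro curr i; simp [pvA_loopEnd, pvB_prefixSums, pvB_firstOver]
  | cons s rest ih =>
      intro curr i
      simp only [pvA_loopEnd, pvB_prefixSums, pvB_firstOver]
      split_ifs with h
      · simp
      · exact ih _ _

lemma pvMid_eq (ml sp : Int) : ∀ (xs : List (List Int)) (curr i : Int),
    pvA_loopMiddle ml sp xs curr i =
      some (sp, sp + (pvB_firstOver (pvB_prefixSums xs curr) ml i).getD (i + (xs.length : Int) - 1)) := by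
  intro xs
  induction xs with
  | nil => intro curr i; simp [pvA_loopMiddle, pvB_prefixSums, pvB_firstOver]; ring
  | cons s rest ih =>
      intro curr i
      simp only [pvA_loopMiddle, pvB_prefixSums, pvB_firstOver]
      split_ifs with h
      · simp
      · rw [ih]
        have : (i + 1) + (rest.length : Int) - 1 = i + ((rest.length : Int) + 1) - 1 := by ring
        simp [this]

-- ===== VERDICT (by name: the statement is the Claim_ definition above) =====
theorem get_max_sentences_spec : Claim_equal_get_max_sentences := by
  intro tt ml tp sp _ _
  unfold Spec_get_max_sentences get_max_sentences get_max_sentences_alt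
  split_ifs with h1 h2 h3
  · exact pvStart_eq ml tt 0 0
  · exact pvEnd_eq ml (tt.length : Int) tt.reverse 0 0
  · rw [pvMid_eq]; simp
  · rfl
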